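-- pv_equiv track=rewrite | github.com/lucaagozzino/Fantapalla_simulazioni | Utilities_fantapalla.py | goal_scored
-- ===== SOURCE A (Python) =====
-- def goal_scored(voti_squadre, fasce_goal):
--     team_goals={}
--     for team, voto in voti_squadre.items():
--         goals = 0
--         for i in range(len(fasce_goal)):
--             if voto >= fasce_goal[i]:
--                 goals = i+1
--         team_goals[team] = goals
--     return team_goals
-- ===== SOURCE B (Python) =====
-- def goal_scored(voti_squadre, fasce_goal):
--     def goals_for(voto):
--         for i, soglia in reversed(list(enumerate(fasce_goal))):
--             if voto >= soglia:
--                 return i + 1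
--         return 0
--     return {team: goals_for(voto) for team, voto in voti_squadre.items()}
-- ===== Notes on version B (the rewrite author's own statement) =====
-- stated objective: alternative
-- what changed: Per team, instead of a full forward scan over all bands that keeps overwriting the goal count, B scans reversed(enumerate(fasce_goal)) and returns at the first band the score reaches (the highest-matching index), building the result with a dict comprehension.
import Mathlib
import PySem

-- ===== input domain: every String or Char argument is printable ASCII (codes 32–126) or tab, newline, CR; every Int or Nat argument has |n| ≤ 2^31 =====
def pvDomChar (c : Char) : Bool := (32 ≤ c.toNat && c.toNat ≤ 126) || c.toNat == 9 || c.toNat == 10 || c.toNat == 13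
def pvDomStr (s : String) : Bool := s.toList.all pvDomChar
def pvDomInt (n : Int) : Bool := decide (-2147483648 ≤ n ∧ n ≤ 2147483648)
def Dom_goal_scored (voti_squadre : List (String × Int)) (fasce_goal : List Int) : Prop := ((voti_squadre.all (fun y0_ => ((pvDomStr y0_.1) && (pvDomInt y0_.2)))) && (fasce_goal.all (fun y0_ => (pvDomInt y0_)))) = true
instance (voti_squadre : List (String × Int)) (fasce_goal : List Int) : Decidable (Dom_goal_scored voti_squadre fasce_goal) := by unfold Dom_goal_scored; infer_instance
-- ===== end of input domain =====

-- B replaces A's full forward scan (overwriting the goal count) by a reverse scan over the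
-- enumerated bands that returns at the first match; same return value, alternative decomposition.

-- ===== PORT A =====
-- literal port of A: for each team, fold over range(len(fasce_goal)), overwriting goals,
-- then team_goals[team] = goals; return the dict (as its items list).
def goal_scored (voti_squadre : List (String × Int)) (fasce_goal : List Int) : List (String × Int) :=
  (voti_squadre.foldl
    (fun (team_goals : PySem.Dict String Int) tv =>
      team_goals.insert tv.1
        ((PySem.List.pyRange 0 (fasce_goal.length : Int) 1).foldl
          (fun goals i => if tv.2 ≥ PySem.List.pyGetD fasce_goal i 0 then i + 1 else goals) 0))
    PySem.Dict.empty).items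

-- ===== PORT B =====
-- helper for B: 'for i, soglia in reversed(list(enumerate(fasce_goal))): if voto >= soglia: return i+1' / 'return 0'
def pvGoalsFor (voto : Int) : List (Int × Int) → Int
  | [] => 0
  | (i, soglia) :: rest => if voto ≥ soglia then i + 1 else pvGoalsFor voto rest

def goal_scored_alt (voti_squadre : List (String × Int)) (fasce_goal : List Int) : List (String × Int) :=
  (voti_squadre.foldl
    (fun (d : PySem.Dict String Int) tv =>
      d.insert tv.1 (pvGoalsFor tv.2 (PySem.List.enumerate fasce_goal 0).reverse))
    PySem.Dict.empty).items

-- ===== PRECONDITION & SPEC =====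
def Spec_goal_scored (voti_squadre : List (String × Int)) (fasce_goal : List Int) (out : List (String × Int)) : Prop := out = goal_scored_alt voti_squadre fasce_goal
instance (voti_squadre : List (String × Int)) (fasce_goal : List Int) (out : List (String × Int)) : Decidable (Spec_goal_scored voti_squadre fasce_goal out) := by unfold Spec_goal_scored; infer_instance

-- ===== CLAIM (what is proved, stated in full; the proofs are below) =====
def Claim_equal_goal_scored : Prop := ∀ (voti_squadre : List (String × Int)) (fasce_goal : List Int), Dom_goal_scored voti_squadre fasce_goal → Spec_goal_scored voti_squadre fasce_goal (goal_scored voti_squadre fasce_goal)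

-- ===== LEMMAS AND PROOFS =====

-- pvGoalsFor with a general default, for the induction
def pvGoalsForD (voto : Int) (init : Int) : List (Int × Int) → Int
  | [] => init
  | (i, soglia) :: rest => if voto ≥ soglia then i + 1 else pvGoalsForD voto init rest

theorem pvGoalsForD_zero (voto : Int) (l : List (Int × Int)) :
    pvGoalsForD voto 0 l = pvGoalsFor voto l := by
  induction l with
  | nil => rfl
  | cons p rest ih => cases p with | mk i s => simp [pvGoalsForD, pvGoalsFor, ih]

theorem pvGoalsForD_append_singleton (voto init : Int) (l : List (Int × Int)) (p : Int × Int) :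
    pvGoalsForD voto init (l ++ [p]) = pvGoalsForD voto (if voto ≥ p.2 then p.1 + 1 else init) l := by
  induction l with
  | nil => cases p; rfl
  | cons q rest ih => cases q with | mk i s => simp [pvGoalsForD, ih]

theorem foldl_eq_scan_rev (voto : Int) (l : List (Int × Int)) (init : Int) :
    l.foldl (fun g p => if voto ≥ p.2 then p.1 + 1 else g) init
      = pvGoalsForD voto init l.reverse := by
  induction l generalizing init with
  | nil => rfl
  | cons p rest ih =>
    simp only [List.foldl_cons, List.reverse_cons, pvGoalsForD_append_singleton]
    exact ih _

-- per-team: A's inner forward overwrite loop equals B's reverse early-exit scan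
theorem inner_eq (voto : Int) (fasce_goal : List Int) :
    (PySem.List.pyRange 0 (fasce_goal.length : Int) 1).foldl
        (fun goals i => if voto ≥ PySem.List.pyGetD fasce_goal i 0 then i + 1 else goals) 0
      = pvGoalsFor voto (PySem.List.enumerate fasce_goal 0).reverse := by
  rw [PySem.List.enumerate_eq_map_pyRange fasce_goal 0]
  rw [← pvGoalsForD_zero, ← foldl_eq_scan_rev, List.foldl_map]
  rfl

-- ===== VERDICT (by name: the statement is the Claim_ definition above) =====
theorem goal_scored_spec : Claim_equal_goal_scored := by
  intro vs fg _
  unfold Spec_goal_scored goal_scored goal_scored_alt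
  congr 1
  apply PySem.List.foldl_congr_mem
  intro d tv _
  rw [inner_eq]
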